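-- pv_equiv track=rewrite | github.com/mitalijuneja/Python-1006 | Homework 1/lists.py | lists_f
-- ===== SOURCE A (Python) =====
-- def lists_f(lst):
--     """ Moves all even elements to the front, otherwise preserving
--         the order of the elements"""
--
--     even_els = []
--     odd_els = []
--     for item in lst:
--         if item % 2 == 0:
--             even_els.append(item)
--         else:
--             odd_els.append(item)
--     return even_els + odd_els
-- ===== SOURCE B (Python) =====
-- def lists_f(lst):
--     """Even elements to the front, order preserved: two independent filter scans."""
--     evens = [x for x in lst if x % 2 == 0]
--     odds = [x for x in lst if x % 2 != 0]
--     return evens + odds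
-- ===== Notes on version B (the rewrite author's own statement) =====
-- stated objective: simpler
-- what changed: Replaces A's single partitioning loop maintaining two accumulators with two independent filter scans (one for evens, one for odds) concatenated.
import Mathlib
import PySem

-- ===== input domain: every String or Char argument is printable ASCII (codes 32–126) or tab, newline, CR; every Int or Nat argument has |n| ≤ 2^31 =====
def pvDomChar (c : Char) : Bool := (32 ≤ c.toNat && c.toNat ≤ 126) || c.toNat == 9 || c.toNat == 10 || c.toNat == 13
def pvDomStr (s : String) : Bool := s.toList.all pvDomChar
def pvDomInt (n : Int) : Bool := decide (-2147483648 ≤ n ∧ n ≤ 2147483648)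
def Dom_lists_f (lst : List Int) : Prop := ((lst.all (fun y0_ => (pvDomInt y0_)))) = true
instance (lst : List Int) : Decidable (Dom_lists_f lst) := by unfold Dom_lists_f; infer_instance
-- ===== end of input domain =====

-- B is a two-pass filter decomposition of A's one-pass partition; equivalence is exact (both total).

-- ===== PORT A =====
-- A: one loop appending each item to even_els or odd_els, then even_els + odd_els.
def lists_f (lst : List Int) : List Int :=
  let p := lst.foldl
    (fun (acc : List Int × List Int) item =>
      if PySem.Int.mod item 2 == 0 then (acc.1 ++ [item], acc.2)
      else (acc.1, acc.2 ++ [item]))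
    ([], [])
  p.1 ++ p.2

-- ===== PORT B =====
-- B: two independent filter scans, concatenated.
def lists_f_alt (lst : List Int) : List Int :=
  (lst.filter (fun x => PySem.Int.mod x 2 == 0))
    ++ (lst.filter (fun x => !(PySem.Int.mod x 2 == 0)))

-- ===== PRECONDITION & SPEC =====
def Spec_lists_f (lst : List Int) (out : List Int) : Prop := out = lists_f_alt lst
instance (lst : List Int) (out : List Int) : Decidable (Spec_lists_f lst out) := by unfold Spec_lists_f; infer_instance

-- ===== CLAIM (what is proved, stated in full; the proofs are below) =====
def Claim_equal_lists_f : Prop := ∀ (lst : List Int), Dom_lists_f lst → Spec_lists_f lst (lists_f lst)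

-- ===== LEMMAS AND PROOFS =====
theorem lists_f_partition (lst e o : List Int) :
    lst.foldl
      (fun (acc : List Int × List Int) item =>
        if PySem.Int.mod item 2 == 0 then (acc.1 ++ [item], acc.2)
        else (acc.1, acc.2 ++ [item]))
      (e, o)
    = (e ++ lst.filter (fun x => PySem.Int.mod x 2 == 0),
       o ++ lst.filter (fun x => !(PySem.Int.mod x 2 == 0))) := by
  induction lst generalizing e o with
  | nil => simp
  | cons x xs ih =>
    simp only [List.foldl_cons, List.filter_cons]
    cases h : (PySem.Int.mod x 2 == 0) <;>
      simp only [Bool.not_true, Bool.not_false, reduceIte] <;>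
      rw [ih] <;> simp

-- ===== VERDICT (by name: the statement is the Claim_ definition above) =====
theorem lists_f_spec : Claim_equal_lists_f := by
  intro lst _
  unfold Spec_lists_f lists_f lists_f_alt
  rw [lists_f_partition]
  simp
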